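-- pv_equiv track=rewrite | github.com/violll/projectEuler | reciprocalCycles.py | getTerminatingDecimalDenominators
-- ===== SOURCE A (Python) =====
-- def getTerminatingDecimalDenominators(max):
--     res = []
--     for i in range(max):
--         for j in range(max):
--             num = 2**i*5**j
--             if num > max: break
--             if num not in res: res.append(num)
--     return sorted(res)
-- ===== SOURCE B (Python) =====
-- def getTerminatingDecimalDenominators(max):
--     res = []
--     p = 1
--     while p <= max:
--         q = p
--         while q <= max:
--             res.append(q)
--             q *= 5
--         p *= 2
--     return sorted(res)
-- ===== Notes on version B (the rewrite author's own statement) =====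
-- stated objective: faster
-- what changed: Replaces the quadratic nested range loops with their linear-scan membership dedup by two multiplicative while loops (outer doubling, inner quintupling) that generate each qualifying power product at most once, needing no membership test.
import Mathlib
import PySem

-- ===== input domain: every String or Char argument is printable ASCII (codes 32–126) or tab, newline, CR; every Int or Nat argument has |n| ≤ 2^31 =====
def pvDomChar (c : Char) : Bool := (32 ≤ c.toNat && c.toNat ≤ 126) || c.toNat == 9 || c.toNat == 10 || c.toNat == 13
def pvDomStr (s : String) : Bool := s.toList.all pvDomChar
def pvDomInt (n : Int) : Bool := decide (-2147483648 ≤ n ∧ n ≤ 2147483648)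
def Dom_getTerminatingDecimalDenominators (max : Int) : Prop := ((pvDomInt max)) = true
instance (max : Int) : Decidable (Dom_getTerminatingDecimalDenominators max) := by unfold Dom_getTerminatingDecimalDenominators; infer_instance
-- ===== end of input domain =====

-- B replaces A's nested range(max) loops (with a linear membership test for dedup) by two
-- multiplicative while loops that produce each 2^i*5^j ≤ max exactly once; timing reported faster.

-- ===== PORT A =====
-- inner 'for j in range(max)' loop: walks the j-list, 'break' returns the accumulator.
-- exponents: i and j come from range() so they are ≥ 0; '.toNat' is exact there (not an index).
def pvInnerA (max i : Int) : List Int → List Int → List Int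
  | [], res => res
  | j :: js, res =>
      let num : Int := 2 ^ i.toNat * 5 ^ j.toNat
      if num > max then res
      else if num ∈ res then pvInnerA max i js res
      else pvInnerA max i js (res ++ [num])

def getTerminatingDecimalDenominators (max : Int) : List Int :=
  PySem.List.sorted
    ((PySem.List.pyRange 0 max 1).foldl
      (fun res i => pvInnerA max i (PySem.List.pyRange 0 max 1) res) [])
    (fun x => x) false

-- ===== PORT B =====
-- the two while loops of Source B; 'fuel' only makes them total: max.toNat+1 steps always suffice
-- (q quintuples / p doubles each step, and 5^f > max, 2^f > max for f = max.toNat+1).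
def pvFives (max : Int) : Nat → Int → List Int → List Int
  | 0, _, res => res
  | f + 1, q, res => if q ≤ max then pvFives max f (5 * q) (res ++ [q]) else res

def pvTwos (max : Int) : Nat → Int → List Int → List Int
  | 0, _, res => res
  | f + 1, p, res => if p ≤ max then pvTwos max f (2 * p) (pvFives max (max.toNat + 1) p res) else res

def getTerminatingDecimalDenominators_alt (max : Int) : List Int :=
  PySem.List.sorted (pvTwos max (max.toNat + 1) 1 []) (fun x => x) false

-- ===== PRECONDITION & SPEC =====
def Spec_getTerminatingDecimalDenominators (max : Int) (out : List Int) : Prop := out = getTerminatingDecimalDenominators_alt max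
instance (max : Int) (out : List Int) : Decidable (Spec_getTerminatingDecimalDenominators max out) := by unfold Spec_getTerminatingDecimalDenominators; infer_instance

-- ===== CLAIM (what is proved, stated in full; the proofs are below) =====
def Claim_equal_getTerminatingDecimalDenominators : Prop := ∀ (max : Int), Dom_getTerminatingDecimalDenominators max → Spec_getTerminatingDecimalDenominators max (getTerminatingDecimalDenominators max)

-- ===== LEMMAS AND PROOFS =====

-- unique factorisation of 2^a*5^b (the part the proofs need): differing 2-exponents differ.
lemma pv_two_five_ne (i a b j : Nat) (h : i < a) : (2:ℤ) ^ a * 5 ^ b ≠ 2 ^ i * 5 ^ j := by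
  intro heq
  have h2 : (2:ℤ) ^ i * (2 ^ (a - i) * 5 ^ b) = 2 ^ i * 5 ^ j := by
    rw [← heq, ← mul_assoc, ← pow_add]
    congr 2
    omega
  have h3 : (2:ℤ) ^ (a - i) * 5 ^ b = 5 ^ j :=
    mul_left_cancel₀ (by positivity) h2
  have hd : (2:ℤ) ∣ 5 ^ j := by
    rw [← h3]
    exact Dvd.dvd.mul_right (dvd_pow_self 2 (by omega)) _
  have := Int.prime_two.dvd_of_dvd_pow hd
  norm_num at this

lemma pv_five_pow_lt (j k : Nat) (h : j < k) : (5:ℤ) ^ j < 5 ^ k :=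
  pow_lt_pow_right₀ (by norm_num) h

lemma pv_lt_pow5 (n : Nat) : (n : ℤ) < 5 ^ n := by
  exact_mod_cast Nat.lt_pow_self (by norm_num) (n := n)

lemma pv_one_le_two_pow (i : Nat) : (1:ℤ) ≤ 2 ^ i := one_le_pow₀ (by norm_num)

-- A's inner loop breaks immediately once 2^i*5^j already exceeds max.
lemma pv_innerA_stop (max : Int) (i j : Nat) (res : List Int) (h : max < 2 ^ i * 5 ^ j) :
    pvInnerA max (i : Int) (PySem.List.pyRange (j : Int) max 1) res = res := by
  by_cases hj : (j : Int) < max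
  · rw [PySem.List.pyRange_one_cons hj]
    simp only [pvInnerA, Int.toNat_natCast, gt_iff_lt]
    rw [if_pos h]
  · rw [PySem.List.pyRange_one_eq_nil (by omega)]
    rfl

-- A's inner loop (from index j, fresh exponents in res) computes exactly B's fives loop.
lemma pv_inner_eq_fives (max : Int) (i : Nat) :
    ∀ (f j : Nat) (res : List Int),
      max < 2 ^ i * 5 ^ (j + f) →
      (∀ k : Nat, j ≤ k → ((2:ℤ) ^ i * 5 ^ k) ∉ res) →
      pvInnerA max (i : Int) (PySem.List.pyRange (j : Int) max 1) res
        = pvFives max f ((2:ℤ) ^ i * 5 ^ j) res := by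
  intro f
  induction f with
  | zero =>
      intro j res hfuel _
      simpa [pvFives] using pv_innerA_stop max i j res (by simpa using hfuel)
  | succ f ih =>
      intro j res hfuel hmem
      by_cases hle : (2:ℤ) ^ i * 5 ^ j ≤ max
      · have hj : (j : Int) < max := by
          have h1 : (j : ℤ) < 5 ^ j := pv_lt_pow5 j
          have h2 : (5:ℤ) ^ j ≤ 2 ^ i * 5 ^ j := by
            have := pv_one_le_two_pow i
            nlinarith [pow_pos (by norm_num : (0:ℤ) < 5) j]
          omega
        rw [PySem.List.pyRange_one_cons hj]
        simp only [pvInnerA, Int.toNat_natCast, gt_iff_lt]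
        rw [if_neg (by omega), if_neg (by exact hmem j le_rfl)]
        have hcast : (j : Int) + 1 = ((j + 1 : Nat) : Int) := by push_cast; ring
        rw [hcast]
        have hstep := ih (j + 1) (res ++ [(2:ℤ) ^ i * 5 ^ j])
          (by
            have : j + 1 + f = j + (f + 1) := by omega
            rw [this]; exact hfuel)
          (by
            intro k hk
            simp only [List.mem_append, List.mem_singleton]
            push Not
            refine ⟨hmem k (by omega), ?_⟩
            intro hEq
            have h5 : (5:ℤ) ^ j < 5 ^ k := pv_five_pow_lt j k (by omega)
            have hpos : (0:ℤ) < 2 ^ i := by positivity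
            nlinarith)
        rw [hstep]
        symm
        simp only [pvFives]
        rw [if_pos hle]
        congr 1
        rw [pow_succ]
        ring
      · rw [pv_innerA_stop max i j res (by omega)]
        simp only [pvFives]
        rw [if_neg hle]

-- everything B's fives loop adds is q times a power of 5.
lemma pv_mem_fives (max : Int) :
    ∀ (f : Nat) (q : Int) (res : List Int) (x : Int),
      x ∈ pvFives max f q res → x ∈ res ∨ ∃ t : Nat, x = q * 5 ^ t := by
  intro f
  induction f with
  | zero => intro q res x hx; exact Or.inl hx
  | succ f ih =>
      intro q res x hx
      simp only [pvFives] at hx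
      by_cases hle : q ≤ max
      · rw [if_pos hle] at hx
        rcases ih (5 * q) (res ++ [q]) x hx with h | ⟨t, ht⟩
        · rcases List.mem_append.1 h with h' | h'
          · exact Or.inl h'
          · exact Or.inr ⟨0, by simpa using List.mem_singleton.1 h'⟩
        · exact Or.inr ⟨t + 1, by rw [ht, pow_succ]; ring⟩
      · rw [if_neg hle] at hx
        exact Or.inl hx

-- once 2^i exceeds max, the rest of A's outer loop is a no-op.
lemma pv_noop_fold (max : Int) :
    ∀ (n : Nat) (i : Nat) (res : List Int), (max - (i : Int)).toNat = n → max < 2 ^ i →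
      (PySem.List.pyRange (i : Int) max 1).foldl
        (fun res i => pvInnerA max i (PySem.List.pyRange 0 max 1) res) res = res := by
  intro n
  induction n with
  | zero =>
      intro i res hn _
      rw [show PySem.List.pyRange (i : Int) max 1 = [] from
        PySem.List.pyRange_one_eq_nil (by omega)]
      rfl
  | succ n ih =>
      intro i res hn hi
      have hj : (i : Int) < max := by omega
      rw [PySem.List.pyRange_one_cons hj]
      simp only [List.foldl_cons]
      have hstop : pvInnerA max (i : Int) (PySem.List.pyRange 0 max 1) res = res := by
        have := pv_innerA_stop max i 0 res (by simpa using hi)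
        simpa using this
      rw [hstop]
      have hcast : (i : Int) + 1 = ((i + 1 : Nat) : Int) := by push_cast; ring
      rw [hcast]
      exact ih (i + 1) res (by omega) (by
        calc max < 2 ^ i := hi
        _ ≤ 2 ^ (i + 1) := by
            have := pv_one_le_two_pow i
            rw [pow_succ]; nlinarith)

-- A's outer loop from exponent i computes exactly B's twos loop.
lemma pv_outer_eq (max : Int) :
    ∀ (f i : Nat) (res : List Int),
      max < 2 ^ (i + f) →
      (∀ a b : Nat, i ≤ a → ((2:ℤ) ^ a * 5 ^ b) ∉ res) →
      (PySem.List.pyRange (i : Int) max 1).foldl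
        (fun res i => pvInnerA max i (PySem.List.pyRange 0 max 1) res) res
        = pvTwos max f ((2:ℤ) ^ i) res := by
  intro f
  induction f with
  | zero =>
      intro i res hfuel _
      simpa [pvTwos] using pv_noop_fold max (max - (i : Int)).toNat i res rfl (by simpa using hfuel)
  | succ f ih =>
      intro i res hfuel hmem
      by_cases hle : (2:ℤ) ^ i ≤ max
      · have hi : (i : Int) < max := by
          have h1 : (i : ℤ) < 2 ^ i := by
            exact_mod_cast Nat.lt_two_pow_self (n := i)
          omega
        rw [PySem.List.pyRange_one_cons hi]
        simp only [List.foldl_cons]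
        have hfive : max < 2 ^ i * 5 ^ (0 + (max.toNat + 1)) := by
          have h1 : max ≤ (max.toNat : ℤ) := Int.self_le_toNat max
          have h2 : ((max.toNat : ℤ)) < 5 ^ (max.toNat + 1) := by
            calc ((max.toNat : ℤ)) < 5 ^ max.toNat := pv_lt_pow5 _
            _ ≤ 5 ^ (max.toNat + 1) := le_of_lt (pv_five_pow_lt _ _ (by omega))
          have h3 := pv_one_le_two_pow i
          have h4 : (0:ℤ) < 5 ^ (max.toNat + 1) := by positivity
          simp only [Nat.zero_add]
          nlinarith
        have hinner := pv_inner_eq_fives max i (max.toNat + 1) 0 res hfive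
          (fun k _ => hmem i k le_rfl)
        have hinner' : pvInnerA max (i : Int) (PySem.List.pyRange 0 max 1) res
            = pvFives max (max.toNat + 1) ((2:ℤ) ^ i) res := by
          simpa using hinner
        rw [hinner']
        have hcast : (i : Int) + 1 = ((i + 1 : Nat) : Int) := by push_cast; ring
        rw [hcast]
        have hnext := ih (i + 1) (pvFives max (max.toNat + 1) ((2:ℤ) ^ i) res)
          (by
            have : i + 1 + f = i + (f + 1) := by omega
            rw [this]; exact hfuel)
          (by
            intro a b ha hx
            rcases pv_mem_fives max (max.toNat + 1) ((2:ℤ) ^ i) res _ hx with h | ⟨t, ht⟩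
            · exact hmem a b (by omega) h
            · exact pv_two_five_ne i a b t (by omega) ht)
        rw [hnext]
        symm
        simp only [pvTwos]
        rw [if_pos hle]
        congr 1
        rw [pow_succ]
        ring
      · rw [pv_noop_fold max (max - (i : Int)).toNat i res rfl (by omega)]
        simp only [pvTwos]
        rw [if_neg hle]

-- ===== VERDICT (by name: the statement is the Claim_ definition above) =====
theorem getTerminatingDecimalDenominators_spec : Claim_equal_getTerminatingDecimalDenominators := by
  intro max _
  show getTerminatingDecimalDenominators max = getTerminatingDecimalDenominators_alt max
  unfold getTerminatingDecimalDenominators getTerminatingDecimalDenominators_alt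
  congr 1
  have h := pv_outer_eq max (max.toNat + 1) 0 []
    (by
      have h1 : max ≤ (max.toNat : ℤ) := Int.self_le_toNat max
      have h2 : ((max.toNat : ℤ)) < 2 ^ max.toNat := by
        exact_mod_cast Nat.lt_two_pow_self (n := max.toNat)
      have h3 : (2:ℤ) ^ max.toNat ≤ 2 ^ (max.toNat + 1) := by
        have := pv_one_le_two_pow max.toNat
        rw [pow_succ]; nlinarith
      show max < (2:ℤ) ^ (0 + (max.toNat + 1))
      simp only [Nat.zero_add]
      omega)
    (by intro a b _ hx; simp at hx)
  simpa using h
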